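-- pv_equiv track=rewrite | github.com/tkilla77/ksr_gf_informatik_2m | encryption/block_coder.py | chain_decrypt
-- ===== SOURCE A (Python) =====
-- def xor(one, two):
--     result = []
--     for i in range(len(one)):
--         result.append(one[i] ^ two[i])
--     return result
--
-- def block_coder(one, two):
--     # In reality, this would be a more complex operation, such as a sequence of
--     # [s-boxes](https://de.wikipedia.org/wiki/S-Box).
--     return xor(one, two)
--
-- def block_decrypt(cipher_bytes, key_bytes, previous_block):
--     # Chaining Block Cipher: Encrypt a single block but first
--     # xor the previous encrypted block with the plain text.
--     return xor(block_coder(cipher_bytes, key_bytes), previous_block)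
--
-- def chain_decrypt(cipher_bytes, key_bytes, block_size = 8):
--     # ensure our key material is divisible by block_size
--     key_bytes = key_bytes * block_size
--
--     previous_block = cipher_bytes[0:block_size]
--     plain_bytes = []
--
--     # The decrypted first block is ignored...
--     for i in range(block_size, len(cipher_bytes), block_size):
--         cipher_block = cipher_bytes[i:i+block_size]
--         key_index = i % len(key_bytes)
--         key_block = key_bytes[key_index:key_index+block_size]
--         plain_block = block_decrypt(cipher_block, key_block, previous_block)
--         plain_bytes += plain_block
--         previous_block = cipher_block
--     return plain_bytes
-- ===== SOURCE B (Python) =====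
-- def chain_decrypt(cipher_bytes, key_bytes, block_size=8):
--     # Flat single pass: plain byte at output position p-block_size is
--     # cipher[p] ^ key[(p % L) % k] ^ cipher[p - block_size], where the
--     # replicated key has length L = len(key_bytes) * block_size.
--     n = len(cipher_bytes)
--     if block_size <= 0 or n <= block_size:
--         return []
--     k = len(key_bytes)
--     L = k * block_size
--     return [cipher_bytes[p] ^ key_bytes[(p % L) % k] ^ cipher_bytes[p - block_size]
--             for p in range(block_size, n)]
-- ===== Notes on version B (the rewrite author's own statement) =====
-- stated objective: faster
-- what changed: Replaces A's slice-a-block / per-block xor-helper nested loops by a single flat comprehension over byte positions, computing the key byte arithmetically instead of materializing the key_bytes*block_size replicated key list and slicing blocks out of it.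
import Mathlib
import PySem

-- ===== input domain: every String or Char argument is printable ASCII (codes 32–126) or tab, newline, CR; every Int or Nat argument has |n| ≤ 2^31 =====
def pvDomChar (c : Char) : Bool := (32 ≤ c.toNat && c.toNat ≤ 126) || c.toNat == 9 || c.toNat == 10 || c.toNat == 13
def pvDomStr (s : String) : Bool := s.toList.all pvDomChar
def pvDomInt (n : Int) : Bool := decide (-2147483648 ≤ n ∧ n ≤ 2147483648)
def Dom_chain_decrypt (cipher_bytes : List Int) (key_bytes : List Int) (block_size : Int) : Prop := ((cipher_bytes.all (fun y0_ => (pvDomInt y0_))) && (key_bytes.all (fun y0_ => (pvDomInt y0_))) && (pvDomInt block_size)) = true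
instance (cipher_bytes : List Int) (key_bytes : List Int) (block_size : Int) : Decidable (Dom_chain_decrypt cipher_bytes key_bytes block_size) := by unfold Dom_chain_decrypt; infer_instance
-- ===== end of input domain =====

-- B replaces A's nested block/xor loops by one flat pass over byte positions with the key
-- byte computed arithmetically instead of slicing a materialized replicated key (measured faster).

-- ===== PORT A =====
-- xor(one, two): result.append(one[i] ^ two[i]) for i in range(len(one))
def pyXor (one two : List Int) : List Int :=
  (PySem.List.pyRange 0 (one.length : Int) 1).foldl
    (fun result i =>
      result ++ [PySem.Int.bxor ((PySem.List.pyGet? one i).getD 0) ((PySem.List.pyGet? two i).getD 0)])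
    []

-- block_coder(one, two) = xor(one, two)
def block_coderA (one two : List Int) : List Int := pyXor one two

-- block_decrypt(cipher_bytes, key_bytes, previous_block)
def block_decryptA (cipher_bytes key_bytes previous_block : List Int) : List Int :=
  pyXor (block_coderA cipher_bytes key_bytes) previous_block

def chain_decrypt (cipher_bytes : List Int) (key_bytes : List Int) (block_size : Int) : List Int :=
  -- key_bytes = key_bytes * block_size
  let key := PySem.List.pyRepeat key_bytes block_size
  -- previous_block = cipher_bytes[0:block_size]; plain_bytes = []
  -- for i in range(block_size, len(cipher_bytes), block_size): …
  ((PySem.List.pyRange block_size (cipher_bytes.length : Int) block_size).foldl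
    (fun (st : List Int × List Int) i =>
      let cipher_block := PySem.List.slice cipher_bytes (some i) (some (i + block_size))
      let key_index := PySem.Int.mod i (key.length : Int)
      let key_block := PySem.List.slice key (some key_index) (some (key_index + block_size))
      let plain_block := block_decryptA cipher_block key_block st.1
      (cipher_block, st.2 ++ plain_block))
    (PySem.List.slice cipher_bytes (some 0) (some block_size), ([] : List Int))).2

-- ===== PORT B =====
def chain_decrypt_alt (cipher_bytes : List Int) (key_bytes : List Int) (block_size : Int) : List Int :=
  let n : Int := (cipher_bytes.length : Int)
  if block_size ≤ 0 ∨ n ≤ block_size then []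
  else
    let k : Int := (key_bytes.length : Int)
    let L : Int := k * block_size
    (PySem.List.pyRange block_size n 1).map (fun p =>
      PySem.Int.bxor
        (PySem.Int.bxor ((PySem.List.pyGet? cipher_bytes p).getD 0)
          ((PySem.List.pyGet? key_bytes (PySem.Int.mod (PySem.Int.mod p L) k)).getD 0))
        ((PySem.List.pyGet? cipher_bytes (p - block_size)).getD 0))

-- ===== PRECONDITION & SPEC =====
-- Pre_ excludes exactly the inputs where A raises: block_size = 0 (range() with step 0 is a
-- ValueError) and an empty key with 0 < block_size < len(cipher_bytes) (i % 0 is a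
-- ZeroDivisionError); A returns on every other input.
def Pre_chain_decrypt (cipher_bytes : List Int) (key_bytes : List Int) (block_size : Int) : Prop :=
  block_size ≠ 0 ∧ (key_bytes = [] → (cipher_bytes.length : Int) ≤ block_size ∨ block_size < 0)
instance (cipher_bytes : List Int) (key_bytes : List Int) (block_size : Int) : Decidable (Pre_chain_decrypt cipher_bytes key_bytes block_size) := by unfold Pre_chain_decrypt; infer_instance
def pvWitness_chain_decrypt : List Int × List Int × Int := ([10, 20, 30, 40, 50], [7, 3], 2)

def Spec_chain_decrypt (cipher_bytes : List Int) (key_bytes : List Int) (block_size : Int) (out : List Int) : Prop := out = chain_decrypt_alt cipher_bytes key_bytes block_size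
instance (cipher_bytes : List Int) (key_bytes : List Int) (block_size : Int) (out : List Int) : Decidable (Spec_chain_decrypt cipher_bytes key_bytes block_size out) := by unfold Spec_chain_decrypt; infer_instance

-- ===== CLAIM (what is proved, stated in full; the proofs are below) =====
def Claim_equal_chain_decrypt : Prop := ∀ (cipher_bytes : List Int) (key_bytes : List Int) (block_size : Int), Dom_chain_decrypt cipher_bytes key_bytes block_size → Pre_chain_decrypt cipher_bytes key_bytes block_size → Spec_chain_decrypt cipher_bytes key_bytes block_size (chain_decrypt cipher_bytes key_bytes block_size)

-- ===== LEMMAS AND PROOFS =====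

theorem flatten_replicate_getElem? (xs : List Int) (t j : Nat)
    (hx : xs ≠ []) (hj : j < t * xs.length) :
    (List.flatten (List.replicate t xs))[j]? = xs[j % xs.length]? := by
  induction t generalizing j with
  | zero => omega
  | succ t ih =>
    rw [Nat.succ_mul] at hj
    rw [List.replicate_succ, List.flatten_cons, List.getElem?_append]
    split
    · rw [Nat.mod_eq_of_lt (by assumption)]
    · rename_i h
      rw [Nat.not_lt] at h
      rw [ih (j - xs.length) (by omega)]
      conv_rhs => rw [show j = (j - xs.length) + xs.length by omega, Nat.add_mod_right]

theorem pyRepeat_getElem? (xs : List Int) (m : Int) (j : Nat)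
    (hx : xs ≠ []) (hj : j < (PySem.List.pyRepeat xs m).length) :
    (PySem.List.pyRepeat xs m)[j]? = xs[j % xs.length]? := by
  have hlen : (PySem.List.pyRepeat xs m).length = m.toNat * xs.length := by
    simp [PySem.List.pyRepeat, List.length_flatten]
  exact flatten_replicate_getElem? xs m.toNat j hx (hlen ▸ hj)

theorem pyXor_eq_map (one two : List Int) :
    pyXor one two = (List.range one.length).map
      (fun j => PySem.Int.bxor (one[j]?.getD 0) (two[j]?.getD 0)) := by
  unfold pyXor
  rw [PySem.List.pyRange_zero_natCast, PySem.List.foldl_append_singleton_eq_map, List.map_map]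
  simp

theorem pyRange_eq_nil_of_neg (a b s : Int) (hs : s < 0) (hab : a ≤ b) :
    PySem.List.pyRange a b s = [] := by
  simp [PySem.List.pyRange, show ¬ s = 0 by omega, show ¬ 0 < s by omega, show ¬ b < a by omega]

theorem pyRange_eq_nil_of_pos (a b s : Int) (hs : 0 < s) (hab : b ≤ a) :
    PySem.List.pyRange a b s = [] := by
  rw [PySem.List.pyRange_of_pos _ _ hs, if_neg (by omega)]
  simp

-- one iteration of A's loop produces exactly B's bytes for that block
theorem block_eq (c key : List Int) (bs i : Int) (hbs : 0 < bs) (hk : key ≠ [])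
    (hi : bs ≤ i) (hin : i < (c.length : Int)) (hdvd : bs ∣ i) :
    pyXor (pyXor (PySem.List.slice c (some i) (some (i + bs)))
        (PySem.List.slice (PySem.List.pyRepeat key bs)
          (some (PySem.Int.mod i ((PySem.List.pyRepeat key bs).length : Int)))
          (some (PySem.Int.mod i ((PySem.List.pyRepeat key bs).length : Int) + bs))))
      (PySem.List.slice c (some (i - bs)) (some i))
    = (PySem.List.pyRange i (min (i + bs) (c.length : Int)) 1).map (fun p =>
        PySem.Int.bxor
          (PySem.Int.bxor ((PySem.List.pyGet? c p).getD 0)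
            ((PySem.List.pyGet? key
              (PySem.Int.mod (PySem.Int.mod p ((key.length : Int) * bs)) (key.length : Int))).getD 0))
          ((PySem.List.pyGet? c (p - bs)).getD 0)) := by
  have hk0 : 0 < key.length := List.length_pos_of_ne_nil hk
  have hK : (PySem.List.pyRepeat key bs).length = bs.toNat * key.length := by
    simp [PySem.List.pyRepeat, List.length_flatten]
  have hL : ((PySem.List.pyRepeat key bs).length : Int) = bs * (key.length : Int) := by
    rw [hK]; push_cast; rw [Int.toNat_of_nonneg (by omega)]
  set L : Int := bs * (key.length : Int) with hLdef
  have hLpos : 0 < L := by positivity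
  have hmod : PySem.Int.mod i ((PySem.List.pyRepeat key bs).length : Int) = i % L := by
    rw [hL, PySem.Int.mod_eq_emod_of_pos hLpos]
  set ki : Int := i % L with hkidef
  have hki0 : 0 ≤ ki := Int.emod_nonneg _ (by omega)
  have hkiL : ki < L := Int.emod_lt_of_pos _ hLpos
  have hkidvd : bs ∣ ki := by
    have hdL : bs ∣ L := ⟨(key.length : Int), rfl⟩
    have hdef : ki = i - L * (i / L) := Int.emod_def i L
    rw [hdef]
    exact dvd_sub hdvd (hdL.mul_right _)
  have hkible : ki + bs ≤ L := by
    obtain ⟨u, hu⟩ := hkidvd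
    obtain ⟨v, hv⟩ : bs ∣ L := ⟨(key.length : Int), rfl⟩
    have huv : u < v := by nlinarith
    nlinarith
  rw [hmod]
  have hi0 : (0:Int) ≤ i := by omega
  rw [PySem.List.slice_toNat c hi0 (by omega)]
  rw [PySem.List.slice_toNat _ hki0 (by omega)]
  rw [PySem.List.slice_toNat c (by omega : (0:Int) ≤ i - bs) hi0]
  rw [pyXor_eq_map, pyXor_eq_map, PySem.List.pyRange_one]
  have hcb : (List.take ((i + bs).toNat - i.toNat) (List.drop i.toNat c)).length
      = (min (i + bs) (c.length : Int) - i).toNat := by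
    simp only [List.length_take, List.length_drop]; omega
  rw [hcb, List.length_map, List.length_range]
  have hprod : ki + bs ≤ ((bs.toNat * key.length : Nat) : Int) := by
    push_cast
    rw [Int.toNat_of_nonneg (by omega)]
    exact hkible
  apply List.ext_getElem
  · simp
  · intro j h1 h2
    simp only [List.length_map, List.length_range] at h1
    have hjbs : (j : Int) < bs := by omega
    have hjn : i + (j : Int) < (c.length : Int) := by omega
    simp only [List.getElem_map, List.getElem_range]
    rw [List.getElem?_map, List.getElem?_range (by omega)]
    simp only [Option.map_some, Option.getD_some]
    rw [List.getElem?_take, if_pos (by omega), List.getElem?_drop]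
    rw [List.getElem?_take, if_pos (by omega), List.getElem?_drop]
    rw [List.getElem?_take, if_pos (by omega), List.getElem?_drop]
    rw [pyRepeat_getElem? key bs (ki.toNat + j) hk (by rw [hK]; omega)]
    rw [PySem.List.pyGet?_of_nonneg c (by omega : (0:Int) ≤ i + (j:Int))]
    rw [PySem.List.pyGet?_of_nonneg c (by omega : (0:Int) ≤ i + (j:Int) - bs)]
    have hmodk : PySem.Int.mod (PySem.Int.mod (i + (j:Int)) ((key.length : Int) * bs)) (key.length : Int)
        = (((ki.toNat + j) % key.length : Nat) : Int) := by
      rw [PySem.Int.mod_eq_emod_of_pos (by exact_mod_cast hk0), PySem.Int.mod_eq_emod_of_pos (by positivity)]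
      have h1' : (i + (j:Int)) % ((key.length : Int) * bs) = ki + (j:Int) := by
        have hjL : (j:Int) % L = (j:Int) := Int.emod_eq_of_lt (by omega) (by omega)
        have hout : (ki + (j:Int)) % L = ki + (j:Int) := Int.emod_eq_of_lt (by omega) (by omega)
        rw [mul_comm, ← hLdef, Int.add_emod, ← hkidef, hjL, hout]
      rw [h1']
      push_cast
      rw [Int.toNat_of_nonneg hki0]
    rw [hmodk, PySem.List.pyGet?_natCast key]
    have e1 : (i + (j:Int)).toNat = i.toNat + j := by omega
    have e2 : (i + (j:Int) - bs).toNat = (i - bs).toNat + j := by omega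
    rw [e1, e2]

-- A's loop after t iterations: prev is block t, the accumulator is B's flat map up to there
theorem main_inv (c key : List Int) (bs : Int) (hbs : 0 < bs) (hk : key ≠ [])
    (hn : bs < (c.length : Int)) :
    ∀ t : Nat, bs * t < (c.length : Int) →
    ((List.range t).map (fun (u : Nat) => bs + bs * (u : Int))).foldl
        (fun (st : List Int × List Int) i =>
          (PySem.List.slice c (some i) (some (i + bs)),
           st.2 ++ block_decryptA (PySem.List.slice c (some i) (some (i + bs)))
             (PySem.List.slice (PySem.List.pyRepeat key bs)
               (some (PySem.Int.mod i ((PySem.List.pyRepeat key bs).length : Int)))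
               (some (PySem.Int.mod i ((PySem.List.pyRepeat key bs).length : Int) + bs)))
             st.1))
        (PySem.List.slice c (some 0) (some bs), ([] : List Int))
      = (PySem.List.slice c (some (bs * t)) (some (bs * t + bs)),
         (PySem.List.pyRange bs (min (bs * t + bs) (c.length : Int)) 1).map (fun p =>
           PySem.Int.bxor
             (PySem.Int.bxor ((PySem.List.pyGet? c p).getD 0)
               ((PySem.List.pyGet? key
                 (PySem.Int.mod (PySem.Int.mod p ((key.length : Int) * bs)) (key.length : Int))).getD 0))
             ((PySem.List.pyGet? c (p - bs)).getD 0))) := by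
  intro t
  induction t with
  | zero =>
    intro _
    simp only [List.range_zero, List.map_nil, List.foldl_nil, Nat.cast_zero, mul_zero, zero_add]
    rw [min_eq_left (by omega), PySem.List.pyRange_one_eq_nil (le_refl bs)]
    simp
  | succ t ih =>
    intro ht
    have htc : (t : Int) ≥ 0 := by positivity
    have ht' : bs * t < (c.length : Int) := by push_cast at ht ⊢; nlinarith
    rw [List.range_succ, List.map_append, List.foldl_append, ih ht']
    simp only [List.map_cons, List.map_nil, List.foldl_cons, List.foldl_nil]
    have hieq : bs + bs * (t : Int) = bs * (t : Int) + bs := by ring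
    have hieq2 : bs * ((t : Nat) + 1 : Nat) = bs * (t : Int) + bs := by push_cast; ring
    have hlt : bs * (t : Int) + bs < (c.length : Int) := by push_cast at ht; nlinarith
    rw [Prod.mk.injEq]
    constructor
    · rw [hieq, hieq2]
    · rw [hieq, hieq2]
      have hb := block_eq c key bs (bs * (t : Int) + bs) hbs hk (by nlinarith) hlt ⟨(t : Int) + 1, by ring⟩
      unfold block_decryptA block_coderA
      rw [show bs * (t : Int) + bs - bs = bs * (t : Int) by ring] at hb
      rw [hb]
      rw [min_eq_left (le_of_lt hlt), ← List.map_append, ← PySem.List.pyRange_one_append bs (bs * (t : Int) + bs) _ (by nlinarith) (by omega)]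

-- ===== VERDICT (by name: the statement is the Claim_ definition above) =====
theorem chain_decrypt_spec : Claim_equal_chain_decrypt := by
  unfold Claim_equal_chain_decrypt
  intro c key bs _ hpre
  unfold Spec_chain_decrypt
  obtain ⟨hbs0, hkey⟩ := hpre
  by_cases hneg : bs < 0
  · simp only [chain_decrypt, chain_decrypt_alt]
    rw [pyRange_eq_nil_of_neg _ _ _ hneg (by omega), if_pos (Or.inl (by omega))]
    simp
  · have hbsp : 0 < bs := by omega
    by_cases hsmall : (c.length : Int) ≤ bs
    · simp only [chain_decrypt, chain_decrypt_alt]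
      rw [pyRange_eq_nil_of_pos _ _ _ hbsp hsmall, if_pos (Or.inr hsmall)]
      simp
    · have hlt : bs < (c.length : Int) := by omega
      have hk : key ≠ [] := by
        intro h
        rcases hkey h with h' | h' <;> omega
      simp only [chain_decrypt, chain_decrypt_alt]
      rw [if_neg (by omega)]
      rw [PySem.List.pyRange_of_pos bs (c.length : Int) hbsp, if_pos hlt]
      have harith : ((c.length : Int) - bs + bs - 1) = (c.length : Int) - 1 := by ring
      rw [harith]
      set q : Int := ((c.length : Int) - 1) / bs with hqdef
      have hq0 : 0 ≤ q := Int.ediv_nonneg (by omega) (by omega)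
      have hdm := Int.mul_ediv_add_emod ((c.length : Int) - 1) bs
      rw [← hqdef] at hdm
      have hr0 := Int.emod_nonneg ((c.length : Int) - 1) (by omega : bs ≠ 0)
      have hrb := Int.emod_lt_of_pos ((c.length : Int) - 1) hbsp
      have hcast : ((q.toNat : Nat) : Int) = q := Int.toNat_of_nonneg hq0
      have hN : bs * ((q.toNat : Nat) : Int) < (c.length : Int) := by
        rw [hcast]; omega
      rw [main_inv c key bs hbsp hk hlt q.toNat hN]
      rw [min_eq_right (by rw [hcast]; omega)]
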